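-- pv_equiv track=rewrite | github.com/iwanders/mcp9600_logger | analysis/solder_plot.py | add_temps
-- ===== SOURCE A (Python) =====
-- def add_temps(temps):
--     new_entries = [(0, False)]
--     for k in temps:
--         if len(new_entries) == 0:
--             new_entries.append(k)
--             continue
--         t, v = k
--         new_entries.append((t, new_entries[-1][1]))
--         new_entries.append(k)
--     return new_entries
-- ===== SOURCE B (Python) =====
-- def add_temps(temps):
--     ts = [0] + [t for (t, _) in temps for _ in (0, 1)]
--     vs = [False, False] + [v for (_, v) in temps for _ in (0, 1)]
--     return list(zip(ts, vs))
-- ===== Notes on version B (the rewrite author's own statement) =====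
-- stated objective: alternative
-- what changed: B constructs two independent parallel streams - the times each doubled after a leading 0, and the values each doubled after two leading False - and zips them (zip truncating the surplus last value), replacing A's single loop that appends a hold entry read back from the accumulator's last element before each point.
import Mathlib
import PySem

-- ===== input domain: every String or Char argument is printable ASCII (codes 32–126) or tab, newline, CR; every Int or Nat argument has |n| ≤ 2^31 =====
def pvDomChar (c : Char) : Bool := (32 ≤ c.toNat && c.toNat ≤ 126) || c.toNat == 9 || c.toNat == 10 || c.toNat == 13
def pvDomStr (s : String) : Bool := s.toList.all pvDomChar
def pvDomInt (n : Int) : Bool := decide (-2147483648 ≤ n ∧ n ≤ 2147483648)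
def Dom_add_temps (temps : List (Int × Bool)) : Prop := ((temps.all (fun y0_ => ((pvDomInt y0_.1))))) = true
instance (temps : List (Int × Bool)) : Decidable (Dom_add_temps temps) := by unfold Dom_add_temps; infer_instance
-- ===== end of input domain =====

-- B builds the result by zipping two independently built parallel streams (doubled
-- times after a leading 0; doubled values after two leading False, zip truncating),
-- instead of A's loop appending a hold entry read from the accumulator's last
-- element (objective: alternative; same O(n) cost).


-- ===== PORT A =====
-- loop body: if len(new_entries)==0: append k; else append (t, new_entries[-1][1]) then k
def add_temps (temps : List (Int × Bool)) : List (Int × Bool) :=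
  temps.foldl
    (fun new_entries k =>
      if new_entries.length == 0 then new_entries ++ [k]
      else new_entries ++ [(k.1, (new_entries.getLastD (0, false)).2), k])
    [(0, false)]

-- ===== PORT B =====
-- ts = [0] + each time twice; vs = [False, False] + each value twice; zip (truncates)
def add_temps_alt (temps : List (Int × Bool)) : List (Int × Bool) :=
  let ts : List Int := 0 :: temps.flatMap (fun p => [p.1, p.1])
  let vs : List Bool := false :: false :: temps.flatMap (fun p => [p.2, p.2])
  ts.zip vs

-- ===== PRECONDITION & SPEC =====
def Spec_add_temps (temps : List (Int × Bool)) (out : List (Int × Bool)) : Prop := out = add_temps_alt temps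
instance (temps : List (Int × Bool)) (out : List (Int × Bool)) : Decidable (Spec_add_temps temps out) := by unfold Spec_add_temps; infer_instance

-- ===== CLAIM (what is proved, stated in full; the proofs are below) =====
def Claim_equal_add_temps : Prop := ∀ (temps : List (Int × Bool)), Dom_add_temps temps → Spec_add_temps temps (add_temps temps)

-- ===== LEMMAS AND PROOFS =====

-- the common expansion: prev-held entry then the new entry, threading the held bool
def pvFlat (b : Bool) : List (Int × Bool) → List (Int × Bool)
  | [] => []
  | (t, v) :: rest => (t, b) :: (t, v) :: pvFlat v rest

theorem add_temps_loop (temps : List (Int × Bool)) :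
    ∀ (acc : List (Int × Bool)), acc ≠ [] →
    temps.foldl
      (fun new_entries k =>
        if new_entries.length == 0 then new_entries ++ [k]
        else new_entries ++ [(k.1, (new_entries.getLastD (0, false)).2), k])
      acc = acc ++ pvFlat (acc.getLastD (0, false)).2 temps := by
  induction temps with
  | nil => intro acc _; simp [pvFlat]
  | cons k rest ih =>
    intro acc hacc
    obtain ⟨t, v⟩ := k
    have hlen : (acc.length == 0) = false := by
      simp [List.length_eq_zero_iff, hacc]
    simp only [List.foldl_cons, hlen, Bool.false_eq_true, if_false]
    rw [ih (acc ++ [(t, (acc.getLastD (0, false)).2), (t, v)]) (by simp)]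
    simp [pvFlat]

theorem zip_flat (temps : List (Int × Bool)) :
    ∀ (b : Bool),
    (temps.flatMap (fun p => [p.1, p.1])).zip
        (b :: temps.flatMap (fun p => [p.2, p.2])) = pvFlat b temps := by
  induction temps with
  | nil => intro b; simp [pvFlat]
  | cons k rest ih =>
    intro b
    obtain ⟨t, v⟩ := k
    simp [pvFlat, ih v]

-- ===== VERDICT (by name: the statement is the Claim_ definition above) =====
theorem add_temps_spec : Claim_equal_add_temps := by
  intro temps _
  unfold Spec_add_temps add_temps add_temps_alt
  rw [add_temps_loop temps [(0, false)] (by simp)]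
  dsimp only
  rw [List.zip_cons_cons, zip_flat temps false]
  simp
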